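-- pv_equiv track=rewrite | github.com/jk-jung/problem-solving | codewars/6kyu/6_Simple Fun #342: Buy Newspaper.py | buy_newspaper
-- ===== SOURCE A (Python) =====
-- def buy_newspaper(a, b):
--     r, i = 1, 0
--     for x in b:
--         i = a.find(x, i) + 1
--         if i == 0:
--             r += 1
--             i = a.find(x) + 1
--         if i == 0:
--             return -1
--     return r
-- ===== SOURCE B (Python) =====
-- def buy_newspaper(a, b):
--     # Index a once: char -> ascending list of its positions; then binary-search
--     # (hand-rolled bisect_left) for the next position instead of rescanning a.
--     positions = {}
--     for j, c in enumerate(a):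
--         positions.setdefault(c, []).append(j)
--     r, i = 1, 0
--     for x in b:
--         ps = positions.get(x)
--         if ps is None:
--             return -1
--         lo, hi = 0, len(ps)
--         while lo < hi:
--             mid = (lo + hi) // 2
--             if ps[mid] < i:
--                 lo = mid + 1
--             else:
--                 hi = mid
--         if lo == len(ps):
--             r += 1
--             lo = 0
--         i = ps[lo] + 1
--     return r
-- ===== Notes on version B (the rewrite author's own statement) =====
-- stated objective: alternative
-- what changed: B precomputes a char->sorted-positions index of a once and locates each next position with a hand-rolled binary search (bisect_left), instead of rescanning a with str.find for every character of b.
import Mathlib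
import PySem

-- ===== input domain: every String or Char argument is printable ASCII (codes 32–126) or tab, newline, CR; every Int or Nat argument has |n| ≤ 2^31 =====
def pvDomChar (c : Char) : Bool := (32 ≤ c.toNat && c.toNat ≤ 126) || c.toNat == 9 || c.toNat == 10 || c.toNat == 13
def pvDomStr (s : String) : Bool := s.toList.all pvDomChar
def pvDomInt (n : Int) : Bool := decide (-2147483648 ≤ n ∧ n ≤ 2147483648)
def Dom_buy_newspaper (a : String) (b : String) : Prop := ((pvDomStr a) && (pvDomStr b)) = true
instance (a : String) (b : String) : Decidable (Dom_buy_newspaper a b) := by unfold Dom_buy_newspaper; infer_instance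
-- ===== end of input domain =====

-- B replaces A's repeated str.find scans over `a` by a once-built char→positions index
-- plus a hand-rolled binary search (bisect_left) per character of `b`.

-- ===== PORT A =====
-- the for-loop of A: state (r, i); `return -1` modelled by stopping the recursion with -1
def pvLoopA (s : List Char) (r i : Int) : List Char → Int
  | [] => r
  | x :: rest =>
    let i1 := PySem.Chars.findFrom s [x] i + 1
    let ri : Int × Int := if i1 = 0 then (r + 1, PySem.Chars.find s [x] + 1) else (r, i1)
    if ri.2 = 0 then -1 else pvLoopA s ri.1 ri.2 rest

def buy_newspaper (a : String) (b : String) : Int :=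
  pvLoopA a.toList 1 0 b.toList

-- ===== PORT B =====
-- positions = {}; for j, c in enumerate(a): positions.setdefault(c, []).append(j)
def pvPositions (s : List Char) : PySem.Dict Char (List Int) :=
  (PySem.List.enumerate s 0).foldl (fun d p => d.modify p.2 [] (fun l => l ++ [p.1])) PySem.Dict.empty

-- the hand-rolled bisect_left loop of Source B (lo, hi stay ≥ 0, so Nat; (lo+hi)/2 = Python //)
def pvBisect (ps : List Int) (t : Int) (lo hi : Nat) : Nat :=
  if lo < hi then
    let mid := (lo + hi) / 2
    if PySem.List.pyGetD ps (mid : Int) 0 < t then pvBisect ps t (mid + 1) hi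
    else pvBisect ps t lo mid
  else lo
termination_by hi - lo
decreasing_by all_goals omega

-- the for-loop of Source B: state (r, i)
def pvLoopB (pos : PySem.Dict Char (List Int)) (r i : Int) : List Char → Int
  | [] => r
  | x :: rest =>
    match pos.get? x with
    | none => -1
    | some ps =>
      let lo := pvBisect ps i 0 ps.length
      let rlo : Int × Nat := if lo = ps.length then (r + 1, 0) else (r, lo)
      pvLoopB pos rlo.1 (PySem.List.pyGetD ps ((rlo.2 : Nat) : Int) 0 + 1) rest

def buy_newspaper_alt (a : String) (b : String) : Int :=
  pvLoopB (pvPositions a.toList) 1 0 b.toList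

-- ===== PRECONDITION & SPEC =====
def Spec_buy_newspaper (a : String) (b : String) (out : Int) : Prop := out = buy_newspaper_alt a b
instance (a : String) (b : String) (out : Int) : Decidable (Spec_buy_newspaper a b out) := by unfold Spec_buy_newspaper; infer_instance

-- ===== CLAIM (what is proved, stated in full; the proofs are below) =====
def Claim_equal_buy_newspaper : Prop := ∀ (a : String) (b : String), Dom_buy_newspaper a b → Spec_buy_newspaper a b (buy_newspaper a b)

-- ===== LEMMAS AND PROOFS =====

-- the ascending list of occurrence indices of x in s
def pvPosList (s : List Char) (x : Char) : List Int :=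
  ((PySem.List.enumerate s 0).filter (fun p => p.2 == x)).map (fun p => p.1)

lemma pvPositions_getD (s : List Char) (x : Char) :
    (pvPositions s).getD x [] = pvPosList s x := by
  unfold pvPositions pvPosList
  have h : (PySem.List.enumerate s 0).foldl (fun d p => d.modify p.2 [] (fun l => l ++ [p.1])) PySem.Dict.empty
      = ((PySem.List.enumerate s 0).map Prod.swap).foldl (fun d p => d.modify p.1 [] (fun l => l ++ [p.2])) PySem.Dict.empty := by
    rw [List.foldl_map]; simp [Prod.swap]
  rw [h, PySem.Dict.getD_foldl_modify_append]
  simp [List.filter_map, List.map_map, Function.comp_def, Prod.swap]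

lemma pvPositions_get?_eq_none_iff (s : List Char) (x : Char) :
    (pvPositions s).get? x = none ↔ x ∉ s := by
  rw [PySem.Dict.get?_eq_none_iff_not_mem_keys]
  have h := PySem.Dict.keys_foldl_modify_key (PySem.List.enumerate s 0) (fun p => p.2)
      ([] : List Int) (fun _ p => fun l => l ++ [p.1]) PySem.Dict.empty
  unfold pvPositions
  rw [show (fun (d : PySem.Dict Char (List Int)) (p : Int × Char) => d.modify p.2 [] fun l => l ++ [p.1])
      = (fun (d : PySem.Dict Char (List Int)) (p : Int × Char) => d.modify ((fun q => q.2) p) [] ((fun _ q => fun l => l ++ [q.1]) d p)) from rfl, h,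
    PySem.Dict.keys_empty]
  constructor
  · intro h1 hm
    exact h1 ((PySem.Set.mem_update ([] : PySem.Set Char) _ x).2
      (Or.inr (by simpa [PySem.List.map_snd_enumerate] using hm)))
  · intro h1 hm
    rcases (PySem.Set.mem_update _ _ _).1 hm with h2 | h2
    · simp at h2
    · exact h1 (by simpa [PySem.List.map_snd_enumerate] using h2)

lemma mem_pvPosList (s : List Char) (x : Char) (p : Int) :
    p ∈ pvPosList s x ↔ ∃ k : Nat, ∃ h : k < s.length, p = (k : Int) ∧ s[k] = x := by
  unfold pvPosList
  simp only [List.mem_map, List.mem_filter, PySem.List.mem_enumerate_iff]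
  constructor
  · rintro ⟨q, ⟨⟨k, hk, rfl⟩, hq⟩, rfl⟩
    exact ⟨k, hk, by simpa using hq⟩
  · rintro ⟨k, hk, rfl, hx⟩
    exact ⟨((k : Int), s[k]), ⟨⟨k, hk, by simp⟩, by simpa using hx⟩, rfl⟩

lemma pairwise_pvPosList (s : List Char) (x : Char) :
    (pvPosList s x).Pairwise (· < ·) := by
  unfold pvPosList
  exact List.pairwise_map.2 ((PySem.List.pairwise_lt_enumerate s 0).filter _)

lemma pvSingleton_prefix (x : Char) (l : List Char) : [x] <+: l ↔ ∃ t, l = x :: t := by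
  cases l with
  | nil => simp
  | cons y t =>
    constructor
    · intro h
      rcases h with ⟨u, hu⟩
      simp at hu
      exact ⟨t, by simp [hu.1]⟩
    · rintro ⟨u, hu⟩
      rw [hu]
      exact ⟨u, rfl⟩

lemma pvFind?_eq_some_getElem {α : Type} (p : α → Bool) (l : List α) (n : Nat) (hn : n < l.length)
    (hbefore : ∀ j (hj : j < l.length), j < n → ¬ p l[j]) (hp : p l[n]) :
    l.find? p = some l[n] := by
  induction l generalizing n with
  | nil => simp at hn
  | cons a t ih =>
    cases n with
    | zero =>
      simp only [List.getElem_cons_zero] at hp ⊢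
      simp [List.find?, hp]
    | succ m =>
      have ha : ¬ p a := by simpa using hbefore 0 (by simp) (by omega)
      simp only [List.find?, Bool.not_eq_true] at ha ⊢
      rw [ha]
      have := ih m (by simpa using hn) (fun j hj hjm => by
        simpa using hbefore (j+1) (by simpa using hj) (by omega)) (by simpa using hp)
      simpa using this

lemma pvFindFrom_eq (s : List Char) (x : Char) (k : Nat) (hk : k ≤ s.length) :
    PySem.Chars.findFrom s [x] (k : Int) =
      ((pvPosList s x).find? (fun p => decide ((k : Int) ≤ p))).getD (-1) := by
  cases hfind : (pvPosList s x).find? (fun p => decide ((k : Int) ≤ p)) with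
  | none =>
    simp only [Option.getD_none]
    rw [PySem.Chars.findFrom_natCast_eq_neg_one_iff s [x] k hk]
    intro hinf
    have hx : x ∈ s.drop k := (List.singleton_infix_iff x _).1 hinf
    obtain ⟨j, hj, hjx⟩ := List.mem_iff_getElem.1 hx
    have hkj : k + j < s.length := by
      have := hj; simp [List.length_drop] at this; omega
    have hsel : s[k + j] = x := by
      rw [← hjx]; exact (List.getElem_drop (xs := s) (i := k) (j := j)).symm
    have hmem : ((k + j : Nat) : Int) ∈ pvPosList s x :=
      (mem_pvPosList s x _).2 ⟨k + j, hkj, rfl, hsel⟩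
    have h2 := List.find?_eq_none.1 hfind _ hmem
    simp at h2
  | some p =>
    simp only [Option.getD_some]
    obtain ⟨hp, as, bs, heq, hbefore⟩ := List.find?_eq_some_iff_append.1 hfind
    obtain ⟨kp, hkp, rfl, hkpx⟩ := (mem_pvPosList s x p).1 (by rw [heq]; simp)
    have hkle : k ≤ kp := by simpa using hp
    -- drop kp s starts with x
    have hdropkp : s.drop kp = x :: s.drop (kp + 1) := by
      rw [List.drop_eq_getElem_cons hkp, hkpx]
    -- findFrom ≠ -1
    have hne : PySem.Chars.findFrom s [x] (k : Int) ≠ -1 := by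
      intro hmeq
      have hni := (PySem.Chars.findFrom_natCast_eq_neg_one_iff s [x] k hk).1 hmeq
      exact hni ((List.singleton_infix_iff x _).2 (by
        have hxk : x ∈ s.drop kp := by rw [hdropkp]; simp
        exact (List.drop_suffix_drop_left s hkle).subset hxk))
    obtain ⟨hfge, hfpre, hfmin⟩ := PySem.Chars.findFrom_natCast_spec s [x] k hk hne
    set f := PySem.Chars.findFrom s [x] (k : Int) with hfdef
    have hf0 : 0 ≤ f := le_trans (by positivity) hfge
    obtain ⟨t, ht⟩ := (pvSingleton_prefix x _).1 hfpre
    have hflen : f.toNat < s.length := by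
      have : (s.drop f.toNat).length = s.length - f.toNat := List.length_drop ..
      rw [ht] at this
      simp at this
      omega
    have hfx : s[f.toNat] = x := by
      have h0 : (List.drop f.toNat s)[0]'(by rw [ht]; simp) = x := by simp [ht]
      rw [List.getElem_drop] at h0
      simpa using h0
    -- f.toNat ≤ kp by minimality of findFrom
    have h1 : f.toNat ≤ kp := by
      by_contra h
      exact hfmin kp hkle (by omega) (by rw [hdropkp]; exact ⟨_, rfl⟩)
    -- kp ≤ f.toNat: otherwise ↑f.toNat is an earlier element of pvPosList satisfying the predicate
    have h2 : kp ≤ f.toNat := by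
      by_contra h
      have hmemf : ((f.toNat : Nat) : Int) ∈ pvPosList s x :=
        (mem_pvPosList s x _).2 ⟨f.toNat, hflen, rfl, hfx⟩
      have hpair : (as ++ (kp : Int) :: bs).Pairwise (· < ·) := heq ▸ pairwise_pvPosList s x
      have hlt : ((f.toNat : Nat) : Int) < (kp : Int) := by
        have : f.toNat < kp := by omega
        exact_mod_cast this
      have hin : ((f.toNat : Nat) : Int) ∈ as := by
        rw [heq] at hmemf
        rcases List.mem_append.1 hmemf with h3 | h3
        · exact h3
        · rcases List.mem_cons.1 h3 with h4 | h4
          · omega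
          · have h5 := List.rel_of_pairwise_cons (List.pairwise_append.1 hpair).2.1 h4
            omega
      have h6 := hbefore _ hin
      simp at h6
      have hff : ((f.toNat : Nat) : Int) = f := Int.toNat_of_nonneg hf0
      omega
    have hff : ((f.toNat : Nat) : Int) = f := Int.toNat_of_nonneg hf0
    have : f.toNat = kp := by omega
    omega

lemma pvBisect_spec (ps : List Int) (t : Int) (lo hi : Nat)
    (hsort : ps.Pairwise (· ≤ ·)) (hhi : hi ≤ ps.length) (hlohi : lo ≤ hi) :
    lo ≤ pvBisect ps t lo hi ∧ pvBisect ps t lo hi ≤ hi ∧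
      (∀ j (hj : j < ps.length), lo ≤ j → j < pvBisect ps t lo hi → ps[j] < t) ∧
      (∀ j (hj : j < ps.length), pvBisect ps t lo hi ≤ j → j < hi → t ≤ ps[j]) := by
  have hmono : ∀ i j (hi' : i < ps.length) (hj : j < ps.length), i ≤ j → ps[i] ≤ ps[j] := by
    intro i j hi' hj hij
    rcases Nat.lt_or_ge i j with h | h
    · exact (List.pairwise_iff_getElem.1 hsort) i j hi' hj h
    · have : i = j := by omega
      subst this; rfl
  revert hhi hlohi
  induction lo, hi using pvBisect.induct (ps := ps) (t := t) with
  | case1 lo hi hlt mid hcmp ih =>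
    intro hhi hlohi
    have hmid : mid < hi := by omega
    have hmidlen : mid < ps.length := by omega
    have hget : PySem.List.pyGetD ps (mid : Int) 0 = ps[mid] := by
      rw [PySem.List.pyGetD_natCast]; exact List.getD_eq_getElem _ _ hmidlen
    have hcmp' : ps[mid] < t := hget ▸ hcmp
    have hrw : pvBisect ps t lo hi = pvBisect ps t (mid + 1) hi := by
      rw [pvBisect, if_pos hlt]
      exact if_pos hcmp
    obtain ⟨h1, h2, h3, h4⟩ := ih hhi (by omega)
    rw [hrw]
    refine ⟨by omega, h2, ?_, h4⟩
    intro j hj hloj hjres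
    rcases Nat.lt_or_ge j (mid + 1) with h | h
    · exact lt_of_le_of_lt (hmono j mid hj hmidlen (by omega)) hcmp'
    · exact h3 j hj h hjres
  | case2 lo hi hlt mid hcmp ih =>
    intro hhi hlohi
    have hmid : mid < hi := by omega
    have hmidlen : mid < ps.length := by omega
    have hget : PySem.List.pyGetD ps (mid : Int) 0 = ps[mid] := by
      rw [PySem.List.pyGetD_natCast]; exact List.getD_eq_getElem _ _ hmidlen
    have hcmp' : t ≤ ps[mid] := le_of_not_gt (fun h => hcmp (hget ▸ h))
    have hrw : pvBisect ps t lo hi = pvBisect ps t lo mid := by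
      rw [pvBisect, if_pos hlt]
      exact if_neg hcmp
    obtain ⟨h1, h2, h3, h4⟩ := ih (by omega) (by omega)
    rw [hrw]
    refine ⟨h1, by omega, h3, ?_⟩
    intro j hj h5 h6
    rcases Nat.lt_or_ge j mid with h | h
    · exact h4 j hj h5 h
    · exact le_trans hcmp' (hmono mid j hmidlen hj h)
  | case3 lo hi hlt =>
    intro hhi hlohi
    have hrw : pvBisect ps t lo hi = lo := by rw [pvBisect, if_neg hlt]
    rw [hrw]
    exact ⟨le_refl _, by omega, fun j _ h1 h2 => by omega, fun j _ h1 h2 => by omega⟩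

lemma pvLoop_eq (s : List Char) (bs : List Char) (r : Int) (k : Nat) (hk : k ≤ s.length) :
    pvLoopA s r (k : Int) bs = pvLoopB (pvPositions s) r (k : Int) bs := by
  induction bs generalizing r k with
  | nil => rfl
  | cons x rest ih =>
    have hfindk := pvFindFrom_eq s x k hk
    have hfind0 : PySem.Chars.find s [x] =
        ((pvPosList s x).find? (fun p => decide ((0 : Int) ≤ p))).getD (-1) := by
      have := pvFindFrom_eq s x 0 (Nat.zero_le _)
      rw [Nat.cast_zero] at this
      rw [← PySem.Chars.findFrom_zero, this]
    have helem : ∀ j (hj : j < (pvPosList s x).length),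
        ∃ m : Nat, ∃ hm : m < s.length, (pvPosList s x)[j] = (m : Int) ∧ s[m] = x := by
      intro j hj
      exact (mem_pvPosList s x _).1 (List.getElem_mem hj)
    by_cases hxs : x ∈ s
    · -- x occurs in a: dict lookup succeeds
      have hget : (pvPositions s).get? x = some (pvPosList s x) := by
        cases hg : (pvPositions s).get? x with
        | none => exact absurd ((pvPositions_get?_eq_none_iff s x).1 hg) (by simpa using hxs)
        | some ps =>
          have h5 := pvPositions_getD s x
          rw [PySem.Dict.getD_eq_get?_getD, hg] at h5
          simp only [Option.getD_some] at h5
          rw [h5]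
      set P := pvPosList s x with hPdef
      have hPne : P ≠ [] := by
        obtain ⟨m, hm, hx⟩ := List.mem_iff_getElem.1 hxs
        intro hnil
        have : ((m : Nat) : Int) ∈ P := (mem_pvPosList s x _).2 ⟨m, hm, rfl, hx⟩
        simp [hnil] at this
      have hPlen : 0 < P.length := List.length_pos_iff.2 hPne
      obtain ⟨h1, h2, h3, h4⟩ := pvBisect_spec P (k : Int) 0 P.length
        ((pairwise_pvPosList s x).imp le_of_lt) (le_refl _) (Nat.zero_le _)
      set lo := pvBisect P (k : Int) 0 P.length with hlodef
      rcases Nat.lt_or_ge lo P.length with hlt | hge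
      · -- next occurrence at index lo of P
        obtain ⟨m, hm, hPm, hsm⟩ := helem lo hlt
        have hfsome : P.find? (fun p => decide ((k : Int) ≤ p)) = some P[lo] := by
          apply pvFind?_eq_some_getElem _ _ lo hlt
          · intro j hj hjlo
            have := h3 j hj (Nat.zero_le _) hjlo
            simp only [Bool.not_eq_true, decide_eq_false_iff_not]
            omega
          · simp only [decide_eq_true_eq]
            exact h4 lo hlt (le_refl _) hlt
        have hkm : (k : Int) ≤ (m : Int) := by
          have := h4 lo hlt (le_refl _) hlt
          rw [hPm] at this; exact this
        -- A side
        rw [pvLoopA]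
        simp only [hfindk, hfsome, Option.getD_some, hPm]
        have hne0 : (m : Int) + 1 ≠ 0 := by positivity
        rw [if_neg hne0]
        simp only
        rw [if_neg hne0]
        -- B side
        rw [pvLoopB, hget]
        simp only [if_neg (Nat.ne_of_lt hlt), ← hlodef]
        have hgetD : PySem.List.pyGetD P ((lo : Nat) : Int) 0 = P[lo] := by
          rw [PySem.List.pyGetD_natCast]; exact List.getD_eq_getElem _ _ hlt
        rw [hgetD, hPm]
        have hcast : (m : Int) + 1 = ((m + 1 : Nat) : Int) := by push_cast; ring
        rw [hcast]
        exact ih r (m + 1) (by omega)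
      · -- wrap: no occurrence ≥ k
        have hlo : lo = P.length := le_antisymm h2 hge
        have hfnone : P.find? (fun p => decide ((k : Int) ≤ p)) = none := by
          rw [List.find?_eq_none]
          intro p hp
          obtain ⟨j, hj, rfl⟩ := List.mem_iff_getElem.1 hp
          have := h3 j hj (Nat.zero_le _) (by omega)
          simp only [decide_eq_true_eq]
          omega
        obtain ⟨m0, hm0, hP0, hsm0⟩ := helem 0 hPlen
        have hf0some : P.find? (fun p => decide ((0 : Int) ≤ p)) = some P[0] := by
          apply pvFind?_eq_some_getElem _ _ 0 hPlen
          · intro j hj hj0; omega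
          · simp only [decide_eq_true_eq, hP0]; positivity
        -- A side
        rw [pvLoopA]
        simp only [hfindk, hfnone, Option.getD_none]
        norm_num
        rw [hfind0, hf0some]
        simp only [Option.getD_some, hP0]
        have hne0 : (m0 : Int) + 1 ≠ 0 := by positivity
        rw [if_neg hne0]
        -- B side
        rw [pvLoopB, hget]
        simp only [← hlodef]
        rw [if_pos hlo]
        have hgetD : PySem.List.pyGetD P ((0 : Nat) : Int) 0 = P[0] := by
          rw [PySem.List.pyGetD_natCast]; exact List.getD_eq_getElem _ _ hPlen
        simp only [Nat.cast_zero] at hgetD ⊢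
        rw [hgetD, hP0]
        have hcast : (m0 : Int) + 1 = ((m0 + 1 : Nat) : Int) := by push_cast; ring
        rw [hcast]
        exact ih (r + 1) (m0 + 1) (by omega)
    · -- x not in a: both return -1
      have hget : (pvPositions s).get? x = none := (pvPositions_get?_eq_none_iff s x).2 hxs
      have hPnil : pvPosList s x = [] := by
        rw [List.eq_nil_iff_forall_not_mem]
        intro p hp
        obtain ⟨m, hm, _, hx⟩ := (mem_pvPosList s x p).1 hp
        exact hxs (hx ▸ List.getElem_mem hm)
      rw [pvLoopA, pvLoopB, hget]
      simp [hfindk, hfind0, hPnil]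

-- ===== VERDICT (by name: the statement is the Claim_ definition above) =====
theorem buy_newspaper_spec : Claim_equal_buy_newspaper := by
  intro a b _
  show buy_newspaper a b = buy_newspaper_alt a b
  unfold buy_newspaper buy_newspaper_alt
  have h := pvLoop_eq a.toList b.toList 1 0 (Nat.zero_le _)
  simpa using h
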